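-- pv_equiv track=rewrite | github.com/Tenkris/mock_question_and_answer | bossbaby/bossbaby.py | evaluate_day
-- ===== SOURCE A (Python) =====
-- GOOD = "Good boy"
--
-- BAD = "Bad boy"
--
-- def evaluate_day(sequence: str) -> str:
--     """Return the verdict for one day's sequence."""
--
--     if not sequence:
--         return BAD
--
--     normalized = ''.join(sequence.split()).upper()
--     shots_remaining = normalized.count('S')
--     pending = 0  # shots that have not been revenged yet
--     seen_shot = False
--
--     for ch in normalized:
--         if ch == 'S':
--             seen_shot = True
--             pending += 1
--             shots_remaining -= 1
--         elif ch == 'R':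
--             if not seen_shot:
--                 return BAD
--             if pending > 0:
--                 pending -= 1
--             elif shots_remaining > 0:
--                 return BAD
--             # else: kids are done; surplus revenge is allowed
--         else:
--             # Inputs are restricted to 'S' and 'R', so any other symbol
--             # invalidates the sequence.
--             return BAD
--
--     return GOOD if pending == 0 else BAD
-- ===== SOURCE B (Python) =====
-- GOOD = "Good boy"
--
-- BAD = "Bad boy"
--
-- def evaluate_day(sequence: str) -> str:
--     """Return the verdict for one day's sequence."""
--
--     if not sequence:
--         return BAD
--
--     normalized = ''.join(sequence.split()).upper()
--     if any(ch != 'S' and ch != 'R' for ch in normalized):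
--         return BAD
--
--     n_s = normalized.count('S')
--     n_r = len(normalized) - n_s
--     if n_s == 0:
--         # only (possibly zero) revenges left after normalization
--         return GOOD if n_r == 0 else BAD
--
--     # Dyck-style check on the prefix up to and including the last shot:
--     # revenges may never outnumber shots there.
--     last = normalized.rindex('S')
--     balance = 0
--     for ch in normalized[:last + 1]:
--         balance += 1 if ch == 'S' else -1
--         if balance < 0:
--             return BAD
--
--     # trailing surplus revenge is allowed, unmatched shots are not
--     return GOOD if n_r >= n_s else BAD
-- ===== Notes on version B (the rewrite author's own statement) =====
-- stated objective: alternative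
-- what changed: Replaces A's interleaved three-variable state machine (pending/shots_remaining/seen_shot with mid-loop early returns) by a precompute-then-check decomposition: reject invalid characters up front, compare the total shot and revenge counts, and run a Dyck-style never-negative balance scan only over the prefix ending at the last shot.
import Mathlib
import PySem

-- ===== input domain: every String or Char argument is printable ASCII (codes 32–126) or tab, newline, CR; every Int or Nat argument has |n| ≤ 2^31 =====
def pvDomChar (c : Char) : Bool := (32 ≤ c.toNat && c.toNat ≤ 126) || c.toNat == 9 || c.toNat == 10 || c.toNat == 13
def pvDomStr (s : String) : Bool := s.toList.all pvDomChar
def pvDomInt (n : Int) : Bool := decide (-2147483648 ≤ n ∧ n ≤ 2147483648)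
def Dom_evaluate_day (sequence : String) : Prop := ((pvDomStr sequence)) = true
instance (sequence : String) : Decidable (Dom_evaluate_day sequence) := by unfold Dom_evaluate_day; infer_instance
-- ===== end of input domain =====

-- B replaces A's interleaved three-counter state machine by a precompute of the
-- character check, the shot/revenge totals and the last-shot index, followed by a
-- Dyck-style never-negative balance scan of the prefix ending at the last shot
-- (alternative decomposition, same cost).

-- ===== PORT A =====
def pyGOOD : String := "Good boy"
def pyBAD : String := "Bad boy"

-- normalized = ''.join(sequence.split()).upper()
def pvNormalize (sequence : String) : String :=
  PySem.Str.upper (PySem.Str.join "" (PySem.Str.split₀ sequence))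

-- A's for-loop with its early returns (state: shots_remaining, pending, seen_shot)
def evalLoopA : List Char → Int → Int → Bool → String
  | [], _, pending, _ => if pending = 0 then pyGOOD else pyBAD
  | ch :: rest, sr, pending, seen =>
    if ch = 'S' then evalLoopA rest (sr - 1) (pending + 1) true
    else if ch = 'R' then
      if seen = false then pyBAD
      else if pending > 0 then evalLoopA rest sr (pending - 1) seen
      else if sr > 0 then pyBAD
      else evalLoopA rest sr pending seen
    else pyBAD

def evaluate_day (sequence : String) : String :=
  if sequence = "" then pyBAD
  else
    let normalized := pvNormalize sequence
    evalLoopA normalized.toList ((PySem.Str.count normalized "S" : Nat) : Int) 0 false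

-- ===== PORT B =====
-- hand port of normalized.rindex('S'): index of the last occurrence
-- (exact whenever 'S' occurs in the string; B only calls it then)
def rindexS (l : List Char) : Nat := l.length - 1 - l.reverse.idxOf 'S'

-- B's balance loop with its early `return BAD` (false = returned BAD)
def dyckScan : List Char → Int → Bool
  | [], _ => true
  | ch :: rest, bal =>
    let bal' := bal + (if ch = 'S' then 1 else -1)
    if bal' < 0 then false else dyckScan rest bal'

def evaluate_day_alt (sequence : String) : String :=
  if sequence = "" then pyBAD
  else
    let normalized := pvNormalize sequence
    let l := normalized.toList
    if l.any (fun ch => ch != 'S' && ch != 'R') then pyBAD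
    else
      let nS : Int := (PySem.Str.count normalized "S" : Nat)
      let nR : Int := PySem.Str.len normalized - nS
      if nS = 0 then (if nR = 0 then pyGOOD else pyBAD)
      else
        let last := rindexS l
        if dyckScan (l.take (last + 1)) 0 then
          (if nS ≤ nR then pyGOOD else pyBAD)
        else pyBAD

-- ===== PRECONDITION & SPEC =====
def Spec_evaluate_day (sequence : String) (out : String) : Prop := out = evaluate_day_alt sequence
instance (sequence : String) (out : String) : Decidable (Spec_evaluate_day sequence out) := by unfold Spec_evaluate_day; infer_instance

-- ===== CLAIM (what is proved, stated in full; the proofs are below) =====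
def Claim_equal_evaluate_day : Prop := ∀ (sequence : String), Dom_evaluate_day sequence → Spec_evaluate_day sequence (evaluate_day sequence)

-- ===== LEMMAS AND PROOFS =====

-- Bridge: PySem's substring count with the single-char needle "S" counts that char.
theorem goS_step (n : Nat) (a : Char) (t : List Char) (acc : Nat) :
    PySem.Chars.count.go ['S'] (n+1) (a::t) acc
    = if (['S'] : List Char).isPrefixOf (a::t) then PySem.Chars.count.go ['S'] n t (acc+1)
      else PySem.Chars.count.go ['S'] n t acc := by
  rw [PySem.Chars.count.go.eq_def]; simp

theorem goS (n : Nat) : ∀ (l : List Char) (acc : Nat), l.length ≤ n →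
    PySem.Chars.count.go ['S'] n l acc = acc + l.count 'S' := by
  induction n with
  | zero =>
    intro l acc h
    cases l with
    | nil => simp [PySem.Chars.count.go]
    | cons a t => simp at h
  | succ n ih =>
    intro l acc h
    cases l with
    | nil => simp [PySem.Chars.count.go]
    | cons a t =>
      rw [goS_step]
      by_cases ha : a = 'S'
      · subst ha
        simp only [List.isPrefixOf]
        rw [if_pos (by simp), ih t (acc+1) (by simpa using h)]
        simp; omega
      · rw [if_neg (by simp [List.isPrefixOf, Ne.symm ha])]
        rw [ih t acc (by simpa using h)]
        simp [List.count_cons, ha]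

theorem countS_bridge (l : List Char) : PySem.Chars.count l ['S'] = l.count 'S' := by
  simpa [PySem.Chars.count] using goS l.length l 0 le_rfl

-- "balance never negative up to the last 'S'", evaluated left to right
def dyckTo : List Char → Int → Bool
  | [], _ => true
  | ch :: rest, p =>
    if (ch :: rest).count 'S' = 0 then true
    else
      let p' := p + (if ch = 'S' then 1 else -1)
      if p' < 0 then false else dyckTo rest p'

-- closed characterisation of A's loop result from state (pending = p, seen)
def specRHS (l : List Char) (p : Int) (seen : Bool) : String :=
  if l.any (fun ch => ch != 'S' && ch != 'R') then pyBAD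
  else if l.count 'S' = 0 then
    (if l ≠ [] ∧ seen = false then pyBAD
     else if p ≤ (l.length : Int) then pyGOOD else pyBAD)
  else
    if dyckTo l p then
      (if p + (l.count 'S' : Int) ≤ (l.count 'R' : Int) then pyGOOD else pyBAD)
    else pyBAD

theorem dyckTo_count_zero (l : List Char) (p : Int) (h : l.count 'S' = 0) :
    dyckTo l p = true := by
  cases l with
  | nil => rfl
  | cons a t => simp [dyckTo, h]
theorem length_eq_counts (l : List Char)
    (h : l.any (fun ch => ch != 'S' && ch != 'R') = false) :
    l.length = l.count 'S' + l.count 'R' := by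
  induction l with
  | nil => simp
  | cons a t ih =>
    simp only [List.any_cons, Bool.or_eq_false_iff] at h
    obtain ⟨ha, ht⟩ := h
    have := ih ht
    rcases (show a = 'S' ∨ a = 'R' by
      by_contra hc
      push_neg at hc
      simp [hc.1, hc.2] at ha) with h' | h' <;>
      simp [h', List.count_cons, this] <;> omega

theorem spec_cons_S (t : List Char) (p : Int) (seen : Bool) (hp : 0 ≤ p) :
    specRHS ('S'::t) p seen = specRHS t (p+1) true := by
  by_cases hbad : t.any (fun ch => ch != 'S' && ch != 'R') = true
  · simp [specRHS, hbad]
  · simp only [Bool.not_eq_true] at hbad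
    by_cases h0 : t.count 'S' = 0
    · have hR : t.count 'R' = t.length := by
        have := length_eq_counts t hbad; omega
      simp [specRHS, dyckTo, List.count_cons, hbad, h0, dyckTo_count_zero t (p+1) h0,
            show ¬(p+1 < 0) by omega, hR]
      all_goals first | rfl | (split_ifs <;> first | rfl | (exfalso; omega) | (intro h; exfalso; omega)) | (intro h; exfalso; omega)
    · simp [specRHS, dyckTo, List.count_cons, hbad, h0, show ¬(p+1 < 0) by omega]
      all_goals first
      | rfl
      | (split_ifs <;> first | rfl | (exfalso; omega) | (intro h; exfalso; omega))
      | (intro h; exfalso; omega)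

theorem spec_cons_R_pos (t : List Char) (p : Int) (hp : 0 < p) :
    specRHS ('R'::t) p true = specRHS t (p-1) true := by
  by_cases hbad : t.any (fun ch => ch != 'S' && ch != 'R') = true
  · simp [specRHS, hbad]
  · simp only [Bool.not_eq_true] at hbad
    by_cases h0 : t.count 'S' = 0
    · simp [specRHS, List.count_cons, hbad, h0, sub_eq_add_neg]
      all_goals first
      | rfl
      | (split_ifs <;> first | rfl | (exfalso; omega) | (intro h; exfalso; omega))
      | (intro h; exfalso; omega)
    · simp [specRHS, dyckTo, List.count_cons, hbad, h0, sub_eq_add_neg,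
            show ¬(p + -1 < 0) by omega]
      all_goals first
      | rfl
      | (split_ifs <;> first | rfl | (exfalso; omega) | (intro h; exfalso; omega))
      | (intro h; exfalso; omega)

theorem spec_cons_R_zero_cnt0 (t : List Char) (h0 : t.count 'S' = 0) :
    specRHS ('R'::t) 0 true = specRHS t 0 true := by
  by_cases hbad : t.any (fun ch => ch != 'S' && ch != 'R') = true
  · simp [specRHS, hbad]
  · simp only [Bool.not_eq_true] at hbad
    simp [specRHS, List.count_cons, hbad, h0]
    all_goals first
      | rfl
      | (split_ifs <;> first | rfl | (exfalso; omega) | (intro h; exfalso; omega))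
      | (intro h; exfalso; omega)

theorem spec_cons_R_zero_cntpos (t : List Char) (h0 : ¬ t.count 'S' = 0) :
    specRHS ('R'::t) 0 true = pyBAD := by
  by_cases hbad : t.any (fun ch => ch != 'S' && ch != 'R') = true
  · simp [specRHS, hbad]
  · simp only [Bool.not_eq_true] at hbad
    simp [specRHS, dyckTo, List.count_cons, hbad, h0]
    all_goals first
      | rfl
      | (split_ifs <;> first | rfl | (exfalso; omega) | (intro h; exfalso; omega))
      | (intro h; exfalso; omega)

theorem spec_cons_R_false (t : List Char) :
    specRHS ('R'::t) 0 false = pyBAD := by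
  by_cases hbad : t.any (fun ch => ch != 'S' && ch != 'R') = true
  · simp [specRHS, hbad]
  · simp only [Bool.not_eq_true] at hbad
    by_cases h0 : t.count 'S' = 0
    · simp [specRHS, List.count_cons, hbad, h0]
      all_goals first
      | rfl
      | (split_ifs <;> first | rfl | (exfalso; omega) | (intro h; exfalso; omega))
      | (intro h; exfalso; omega)
    · simp [specRHS, dyckTo, List.count_cons, hbad, h0]
      all_goals first
      | rfl
      | (split_ifs <;> first | rfl | (exfalso; omega) | (intro h; exfalso; omega))
      | (intro h; exfalso; omega)

theorem spec_cons_bad (ch : Char) (t : List Char) (p : Int) (seen : Bool)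
    (h1 : ¬ ch = 'S') (h2 : ¬ ch = 'R') : specRHS (ch::t) p seen = pyBAD := by
  simp [specRHS, h1, h2]

set_option maxHeartbeats 1000000 in
theorem keyA : ∀ (l : List Char) (p : Int) (seen : Bool), 0 ≤ p → (seen = false → p = 0) →
    evalLoopA l ((l.count 'S' : Nat) : Int) p seen = specRHS l p seen := by
  intro l
  induction l with
  | nil =>
    intro p seen hp _
    simp only [evalLoopA, specRHS, List.any_nil, List.count_nil, List.length_nil]
    split_ifs <;> simp_all <;> omega
  | cons ch t ih =>
    intro p seen hp hseen
    by_cases hS : ch = 'S'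
    · subst hS
      have hstep : evalLoopA ('S'::t) (((('S'::t).count 'S' : Nat)) : Int) p seen
            = evalLoopA t ((t.count 'S' : Nat) : Int) (p+1) true := by
        simp [evalLoopA, List.count_cons]
      rw [hstep, ih (p+1) true (by omega) (by simp), spec_cons_S t p seen hp]
    · by_cases hR : ch = 'R'
      · subst hR
        have hcnt : (('R'::t).count 'S') = t.count 'S' := by simp [List.count_cons]
        cases seen with
        | false =>
          have hp0 : p = 0 := hseen rfl
          subst hp0
          have hstep : evalLoopA ('R'::t) ((('R'::t).count 'S' : Nat) : Int) 0 false = pyBAD := by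
            simp [evalLoopA]
          rw [hstep, spec_cons_R_false t]
        | true =>
          by_cases hpos : p > 0
          · have hstep : evalLoopA ('R'::t) ((('R'::t).count 'S' : Nat) : Int) p true
                  = evalLoopA t ((t.count 'S' : Nat) : Int) (p-1) true := by
              simp [evalLoopA, hcnt, hpos]
            rw [hstep, ih (p-1) true (by omega) (by simp), spec_cons_R_pos t p hpos]
          · have hp0 : p = 0 := by omega
            subst hp0
            by_cases h0 : t.count 'S' = 0
            · have hstep : evalLoopA ('R'::t) ((('R'::t).count 'S' : Nat) : Int) 0 true
                    = evalLoopA t ((t.count 'S' : Nat) : Int) 0 true := by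
                simp [evalLoopA, hcnt, h0]
              rw [hstep, ih 0 true le_rfl (by simp), spec_cons_R_zero_cnt0 t h0]
            · have hstep : evalLoopA ('R'::t) ((('R'::t).count 'S' : Nat) : Int) 0 true = pyBAD := by
                have hmem : 'S' ∈ t := List.count_pos_iff.mp (Nat.pos_of_ne_zero h0)
                simp [evalLoopA, hcnt, hmem]
              rw [hstep, spec_cons_R_zero_cntpos t h0]
      · have hstep : evalLoopA (ch::t) (((ch::t).count 'S' : Nat) : Int) p seen = pyBAD := by
          simp [evalLoopA, hS, hR]
        rw [hstep, spec_cons_bad ch t p seen hS hR]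

-- ---- B-side characterisation ----

theorem first_split (l : List Char) (h : 'S' ∈ l) :
    ∃ c d, l = c ++ 'S' :: d ∧ 'S' ∉ c := by
  induction l with
  | nil => simp at h
  | cons a t ih =>
    by_cases ha : a = 'S'
    · exact ⟨[], t, by simp [ha], by simp⟩
    · have ht : 'S' ∈ t := by
        rcases List.mem_cons.mp h with h' | h'
        · exact absurd h'.symm ha
        · exact h'
      obtain ⟨c, d, hcd, hc⟩ := ih ht
      exact ⟨a :: c, d, by simp [hcd], by simp [hc, Ne.symm ha]⟩

theorem last_split (l : List Char) (h : l.count 'S' ≠ 0) :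
    ∃ a b, l = a ++ 'S' :: b ∧ 'S' ∉ b := by
  have hm : 'S' ∈ l.reverse := by
    simp [List.count_pos_iff.mp (Nat.pos_of_ne_zero h)]
  obtain ⟨c, d, hcd, hc⟩ := first_split l.reverse hm
  refine ⟨d.reverse, c.reverse, ?_, by simpa using hc⟩
  have := congrArg List.reverse hcd
  simpa using this

theorem rindexS_eq (a b : List Char) (hb : 'S' ∉ b) :
    rindexS (a ++ 'S' :: b) = a.length := by
  unfold rindexS
  have : (a ++ 'S' :: b).reverse = b.reverse ++ 'S' :: a.reverse := by
    simp
  rw [this, List.idxOf_append]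
  rw [if_neg (by simpa using hb)]
  simp [List.idxOf_cons_self]

theorem take_last (a b : List Char) :
    (a ++ 'S' :: b).take (a.length + 1) = a ++ ['S'] := by
  rw [List.take_append]
  simp [List.take_of_length_le (le_of_lt (Nat.lt_succ_self a.length))]

theorem dyck_eq (a : List Char) : ∀ (p : Int) (b : List Char), 'S' ∉ b →
    dyckTo (a ++ 'S' :: b) p = dyckScan (a ++ ['S']) p := by
  induction a with
  | nil =>
    intro p b hb
    have hb0 : b.count 'S' = 0 := List.count_eq_zero.mpr hb
    simp only [List.nil_append, dyckTo, dyckScan, List.count_cons, hb0]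
    by_cases h : p + 1 < 0
    · simp [h]
    · simp [h, dyckTo_count_zero b (p+1) hb0, dyckScan]
  | cons c a ih =>
    intro p b hb
    have hcnt : ((c :: (a ++ 'S' :: b)).count 'S') ≠ 0 := by
      simp [List.count_cons, List.count_append]
    simp only [List.cons_append, dyckTo, dyckScan, if_neg hcnt]
    by_cases h : p + (if c = 'S' then 1 else -1) < 0
    · simp [h]
    · simp only [h, if_false, if_neg (by omega : ¬ p + (if c = 'S' then 1 else -1) < 0)]
      exact ih _ b hb

theorem alt_spec (l : List Char) : specRHS l 0 false =
    (if l.any (fun ch => ch != 'S' && ch != 'R') then pyBAD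
     else
      if ((l.count 'S' : Nat) : Int) = 0 then
        (if (l.length : Int) - ((l.count 'S' : Nat) : Int) = 0 then pyGOOD else pyBAD)
      else
        if dyckScan (l.take (rindexS l + 1)) 0 then
          (if ((l.count 'S' : Nat) : Int) ≤ (l.length : Int) - ((l.count 'S' : Nat) : Int)
           then pyGOOD else pyBAD)
        else pyBAD) := by
  by_cases hbad : l.any (fun ch => ch != 'S' && ch != 'R') = true
  · simp [specRHS, hbad]
  · simp only [Bool.not_eq_true] at hbad
    have hlen := length_eq_counts l hbad
    by_cases h0 : l.count 'S' = 0
    · simp only [specRHS, hbad, h0]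
      have h0' : (((l.count 'S' : Nat)) : Int) = 0 := by simp [h0]
      simp only [h0', if_pos rfl, Bool.false_eq_true, if_false]
      rcases List.eq_nil_or_concat' l with hnil | _
      · subst hnil; simp
      · split_ifs <;> simp_all <;> omega
    · obtain ⟨a, b, hab, hb⟩ := last_split l h0
      have hb0 : b.count 'S' = 0 := List.count_eq_zero.mpr hb
      have hdy : dyckTo l 0 = dyckScan (l.take (rindexS l + 1)) 0 := by
        rw [hab, rindexS_eq a b hb, take_last, dyck_eq a 0 b hb]
      simp only [specRHS, hbad, h0, Bool.false_eq_true, if_false, hdy]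
      have h0' : ¬ ((((l.count 'S' : Nat)) : Int) = 0) := by
        simpa using h0
      rw [if_neg h0']
      have hiff : (0 + ((l.count 'S' : Nat) : Int) ≤ ((l.count 'R' : Nat) : Int))
          ↔ (((l.count 'S' : Nat) : Int) ≤ (l.length : Int) - ((l.count 'S' : Nat) : Int)) := by
        omega
      split_ifs with h1 h2 h3 <;> simp_all <;> omega

-- ===== VERDICT (by name: the statement is the Claim_ definition above) =====
theorem evaluate_day_spec : Claim_equal_evaluate_day := by
  intro sequence _
  unfold Spec_evaluate_day evaluate_day evaluate_day_alt
  by_cases h : sequence = ""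
  · rw [if_pos h, if_pos h]
  · rw [if_neg h, if_neg h]
    have hc : (PySem.Str.count (pvNormalize sequence) "S")
        = (pvNormalize sequence).toList.count 'S' := by
      rw [PySem.Str.count_eq]
      simpa using countS_bridge (pvNormalize sequence).toList
    simp only [PySem.Str.len, hc]
    exact (keyA (pvNormalize sequence).toList 0 false le_rfl (fun _ => rfl)).trans
      (alt_spec (pvNormalize sequence).toList)
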